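-- pv_equiv track=rewrite | github.com/BatuhanOzdemir/An-analysis-of-the-Job-market | Crawler.py | sanitize_to_visit_list
-- ===== SOURCE A (Python) =====
-- def sanitize_to_visit_list(url):
--     exclusion_list = ["apple", "google", "cimri", "instagram", "twitter", "facebook", "ik-blog",
--                       "tercih", "pozisyonlar", "universite", "kariyer-rehberi", "bolumler",
--                       "kariyer-kampuste", "kariyer-gunleri", "tercih-motoru"]
--     for unwanted_url in exclusion_list:
--         if url is None or unwanted_url in url:
--             return False
--     return True
-- ===== SOURCE B (Python) =====
-- _EXCLUSION = ["apple", "google", "cimri", "instagram", "twitter", "facebook", "ik-blog",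
--               "tercih", "pozisyonlar", "universite", "kariyer-rehberi", "bolumler",
--               "kariyer-kampuste", "kariyer-gunleri", "tercih-motoru"]
--
-- def sanitize_to_visit_list(url):
--     if url is None:
--         return False
--     # single left-to-right scan over the url: at each position, check whether
--     # any forbidden word starts there
--     for i in range(len(url) + 1):
--         for w in _EXCLUSION:
--             if url.startswith(w, i):
--                 return False
--     return True
-- ===== Notes on version B (the rewrite author's own statement) =====
-- stated objective: alternative
-- what changed: B replaces A's per-word loop with repeated full substring scans by a single left-to-right scan over the url that checks at each position whether any exclusion word starts there (an Aho-Corasick-style sweep without the automaton).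
import Mathlib
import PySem

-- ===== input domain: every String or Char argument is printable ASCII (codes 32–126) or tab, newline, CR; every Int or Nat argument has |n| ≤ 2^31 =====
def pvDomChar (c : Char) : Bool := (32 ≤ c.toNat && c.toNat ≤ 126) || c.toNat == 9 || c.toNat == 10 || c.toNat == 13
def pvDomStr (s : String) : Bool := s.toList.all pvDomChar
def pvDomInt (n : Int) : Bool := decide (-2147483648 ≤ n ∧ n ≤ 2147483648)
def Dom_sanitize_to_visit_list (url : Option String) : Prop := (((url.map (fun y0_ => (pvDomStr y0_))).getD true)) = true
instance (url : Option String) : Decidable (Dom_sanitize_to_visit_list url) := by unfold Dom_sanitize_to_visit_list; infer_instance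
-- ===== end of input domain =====

-- B replaces A's per-word substring-search loop by a single left-to-right scan over the
-- url checking each position for any exclusion word (alternative traversal, same cost class).


-- ===== PORT A =====
def pvExclusionList : List String :=
  ["apple", "google", "cimri", "instagram", "twitter", "facebook", "ik-blog",
   "tercih", "pozisyonlar", "universite", "kariyer-rehberi", "bolumler",
   "kariyer-kampuste", "kariyer-gunleri", "tercih-motoru"]

-- the 'for unwanted_url in exclusion_list' loop with its early return
def pvSanitizeLoopA (url : Option String) : List String → Bool
  | [] => true
  | w :: rest =>
    if (match url with | none => true | some u => PySem.Str.isIn w u) then false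
    else pvSanitizeLoopA url rest

def sanitize_to_visit_list (url : Option String) : Bool :=
  pvSanitizeLoopA url pvExclusionList

-- ===== PORT B =====
-- inner 'for w in _EXCLUSION: if url.startswith(w, i)'; startswith with offset ported by hand
-- as prefix-of-drop over the char list (exact: 0 ≤ i always here)
def pvStartsAt (u : List Char) (i : Nat) (w : String) : Bool :=
  w.toList.isPrefixOf (u.drop i)

-- outer 'for i in range(len(url) + 1)' loop with its early return
def pvScanLoopB (u : List Char) : List Nat → Bool
  | [] => true
  | i :: rest =>
    if pvExclusionList.any (fun w => pvStartsAt u i w) then false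
    else pvScanLoopB u rest

def sanitize_to_visit_list_alt (url : Option String) : Bool :=
  match url with
  | none => false
  | some u => pvScanLoopB u.toList (List.range (u.toList.length + 1))

-- ===== PRECONDITION & SPEC =====
def Spec_sanitize_to_visit_list (url : Option String) (out : Bool) : Prop := out = sanitize_to_visit_list_alt url
instance (url : Option String) (out : Bool) : Decidable (Spec_sanitize_to_visit_list url out) := by unfold Spec_sanitize_to_visit_list; infer_instance

-- ===== CLAIM (what is proved, stated in full; the proofs are below) =====
def Claim_equal_sanitize_to_visit_list : Prop := ∀ (url : Option String), Dom_sanitize_to_visit_list url → Spec_sanitize_to_visit_list url (sanitize_to_visit_list url)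

-- ===== LEMMAS AND PROOFS =====

-- A's loop returns true iff no word of ws occurs in u
theorem pvLoopA_eq_any (u : String) (ws : List String) :
    pvSanitizeLoopA (some u) ws = !ws.any (fun w => PySem.Str.isIn w u) := by
  induction ws with
  | nil => rfl
  | cons w rest ih =>
    simp only [pvSanitizeLoopA, List.any_cons, PySem.Str.isIn_eq]
    by_cases h : PySem.Chars.isIn w.toList u.toList = true
    · simp [h]
    · simp only [Bool.not_eq_true] at h
      simp [h, ih]

-- B's loop returns true iff no listed index is the start of some word of the exclusion list
theorem pvLoopB_eq_any (u : List Char) (idxs : List Nat) :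
    pvScanLoopB u idxs = !idxs.any (fun i => pvExclusionList.any (fun w => pvStartsAt u i w)) := by
  induction idxs with
  | nil => rfl
  | cons i rest ih =>
    simp only [pvScanLoopB, List.any_cons]
    by_cases h : pvExclusionList.any (fun w => pvStartsAt u i w) = true
    · simp [h]
    · simp only [Bool.not_eq_true] at h
      simp [h, ih]

-- scanning all positions 0..len for a prefix of the drop is exactly substring search
theorem pvScan_eq_isIn (u : String) (w : String) :
    (List.range (u.toList.length + 1)).any (fun i => pvStartsAt u.toList i w)
      = PySem.Str.isIn w u := by
  rw [Bool.eq_iff_iff]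
  simp only [List.any_eq_true, List.mem_range, pvStartsAt, List.isPrefixOf_iff_prefix]
  rw [PySem.Str.isIn_eq]
  rw [← PySem.Chars.exists_prefix_drop_iff_isIn]
  constructor
  · rintro ⟨i, _, hp⟩; exact ⟨i, hp⟩
  · rintro ⟨j, hp⟩
    rcases le_or_gt j u.toList.length with hle | hgt
    · exact ⟨j, by omega, hp⟩
    · refine ⟨u.toList.length, by omega, ?_⟩
      rw [List.drop_eq_nil_of_le (le_of_lt hgt)] at hp
      rw [List.drop_eq_nil_of_le (le_refl u.toList.length)]
      exact hp

-- ===== VERDICT (by name: the statement is the Claim_ definition above) =====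
theorem sanitize_to_visit_list_spec : Claim_equal_sanitize_to_visit_list := by
  intro url _
  unfold Spec_sanitize_to_visit_list
  cases url with
  | none => rfl
  | some u =>
    show pvSanitizeLoopA (some u) pvExclusionList
        = pvScanLoopB u.toList (List.range (u.toList.length + 1))
    rw [pvLoopA_eq_any, pvLoopB_eq_any]
    congr 1
    rw [Bool.eq_iff_iff]
    simp only [List.any_eq_true, List.mem_range]
    constructor
    · rintro ⟨w, hw, h⟩
      rw [← pvScan_eq_isIn] at h
      simp only [List.any_eq_true, List.mem_range] at h
      obtain ⟨i, hi, hp⟩ := h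
      exact ⟨i, hi, w, hw, hp⟩
    · rintro ⟨i, hi, w, hw, hp⟩
      refine ⟨w, hw, ?_⟩
      rw [← pvScan_eq_isIn]
      simp only [List.any_eq_true, List.mem_range]
      exact ⟨i, hi, hp⟩
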